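-- pv_equiv track=rewrite | github.com/rekcilyssup/Assignment2-datastructures | q15.py | is_strongly_connected_graph
-- ===== SOURCE A (Python) =====
-- def is_strongly_connected_graph(matrix):
--     """
--     Check if the given directed graph is strongly connected or not.
--     A directed graph is strongly connected if there is a path from
--     every node to every other node.
--
--     Example:
--     Input: [[0,1,0],[0,0,1],[1,0,0]]
--     (0→1, 1→2, 2→0 - a cycle)
--     Output: True
--
--     Example:
--     Input: [[0,1,0],[0,0,1],[0,0,0]]
--     (0→1→2, but no path back)
--     Output: False
--     """
--     if not matrix or len(matrix) == 0:
--         return True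
--
--     num_nodes = len(matrix)
--
--     def can_reach_all(start):
--         """Check if we can reach all nodes from start node using DFS."""
--         visited = [False] * num_nodes
--         stack = [start]
--
--         while stack:
--             node = stack.pop()
--             if visited[node]:
--                 continue
--             visited[node] = True
--
--             # Add all neighbors to stack
--             for neighbor in range(num_nodes):
--                 if matrix[node][neighbor] == 1 and not visited[neighbor]:
--                     stack.append(neighbor)
--
--         # Check if all nodes were visited
--         return all(visited)
--
--     # Check if every node can reach all other nodes
--     return all(can_reach_all(node) for node in range(num_nodes))
-- ===== SOURCE B (Python) =====
-- def is_strongly_connected_graph(matrix):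
--     """Kosaraju criterion by fixed-point saturation: grow the set reachable from
--     node 0 (relaxation rounds of a boolean reach vector, stopping at a fixpoint)
--     on the graph and on its transpose; strongly connected iff both cover all nodes."""
--     if not matrix:
--         return True
--     n = len(matrix)
--
--     def reaches_all(edge):
--         reach = [i == 0 for i in range(n)]
--         for _ in range(n):
--             new = [reach[v] or any(reach[u] and edge(u, v) for u in range(n))
--                    for v in range(n)]
--             if new == reach:
--                 break
--             reach = new
--         return all(reach)
--
--     return (reaches_all(lambda u, v: matrix[u][v] == 1)
--             and reaches_all(lambda u, v: matrix[v][u] == 1))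
-- ===== Notes on version B (the rewrite author's own statement) =====
-- stated objective: alternative
-- what changed: A runs a stack-based DFS from every node; B uses the Kosaraju reachability criterion with a different mechanism: a boolean reach vector grown by n fixed-point relaxation rounds, once on the graph and once on its transpose.
-- outside the precondition, e.g. on is_strongly_connected_graph([[0, 0], [1]]): A returns False, B returns False
import Mathlib
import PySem

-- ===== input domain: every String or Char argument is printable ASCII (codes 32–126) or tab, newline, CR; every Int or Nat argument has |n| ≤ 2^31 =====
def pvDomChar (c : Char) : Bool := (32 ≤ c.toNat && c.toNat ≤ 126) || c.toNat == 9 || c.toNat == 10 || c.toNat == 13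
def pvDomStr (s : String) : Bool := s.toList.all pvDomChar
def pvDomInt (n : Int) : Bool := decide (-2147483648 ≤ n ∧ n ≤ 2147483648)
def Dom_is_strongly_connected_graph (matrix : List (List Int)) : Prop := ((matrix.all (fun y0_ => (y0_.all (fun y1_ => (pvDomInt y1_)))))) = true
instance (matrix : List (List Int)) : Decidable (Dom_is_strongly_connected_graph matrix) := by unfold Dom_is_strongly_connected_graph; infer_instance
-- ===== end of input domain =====

-- B replaces A's DFS-from-every-node check by the Kosaraju criterion computed by
-- fixed-point saturation of a reach vector on the graph and its transpose:
-- objective = alternative algorithm.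

-- ===== PORT A =====
-- Termination helper for A's DFS loop (marking an unvisited node shrinks the
-- number of `false` entries); cited by `pvDfs`'s decreasing_by.
lemma pv_count_set_lt : ∀ (l : List Bool) (i : Nat) (h : i < l.length),
    l[i] = false → (l.set i true).count false < l.count false := by
  intro l
  induction l with
  | nil => intro i h; simp at h
  | cons a t ih =>
      intro i h hf
      cases i with
      | zero => simp at hf; subst hf; simp
      | succ j =>
          simp only [List.length_cons, Nat.succ_lt_succ_iff] at h
          simp only [List.getElem_cons_succ] at hf
          simpa [List.set, List.count_cons] using ih j h hf
-- A's stack-based DFS while-loop (`can_reach_all` body).  Head of the list = top of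
-- the Python stack.  `node < visited.length` is an in-range guard: Python raises
-- IndexError there (excluded by Pre_); indices pushed by the loop are always in range.
def pvDfs (n : Nat) (edge : Nat → Nat → Bool) (visited : List Bool) (stack : List Nat) : List Bool :=
  match stack with
  | [] => visited
  | node :: rest =>
    if h : node < visited.length then
      if visited.getD node false then pvDfs n edge visited rest
      else
        let visited' := visited.set node true
        pvDfs n edge visited'
          ((List.range n).foldl
            (fun st nb => if edge node nb && !(visited'.getD nb false) then nb :: st else st) rest)
    else visited
termination_by (visited.count false, stack.length)
decreasing_by
  · exact Prod.Lex.right _ (Nat.lt_succ_self _)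
  · apply Prod.Lex.left
    rename_i hvis
    exact pv_count_set_lt visited node h
      (by simpa [List.getD_eq_getElem?_getD, List.getElem?_eq_getElem h] using hvis)

-- matrix[u][v] == 1 ; in range for every index queried when Pre_ holds (exact there)
def pvEdge (matrix : List (List Int)) (u v : Nat) : Bool :=
  ((matrix.getD u []).getD v 0) == 1

def pvCanReachAll (matrix : List (List Int)) (start : Nat) : Bool :=
  (pvDfs matrix.length (pvEdge matrix) (List.replicate matrix.length false) [start]).all (fun b => b)

def is_strongly_connected_graph (matrix : List (List Int)) : Bool :=
  if matrix.isEmpty then true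
  else (List.range matrix.length).all (fun node => pvCanReachAll matrix node)

-- ===== PORT B =====
-- One relaxation round: reach' v = reach v or some reached u has an edge u→v
-- (the Python list comprehension building the new vector from the old one).
def pvStep (n : Nat) (edge : Nat → Nat → Bool) (r : List Bool) : List Bool :=
  (List.range n).map
    (fun v => r.getD v false || (List.range n).any (fun u => r.getD u false && edge u v))

-- `for _ in range(n): new = …; if new == reach: break; reach = new` of Source B,
-- as a fueled loop (fuel = the range(n) counter)
def pvSatLoop (n : Nat) (edge : Nat → Nat → Bool) : Nat → List Bool → List Bool
  | 0, r => r
  | Nat.succ fuel, r =>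
      let new := pvStep n edge r
      if new = r then r else pvSatLoop n edge fuel new

def pvSaturate (n : Nat) (edge : Nat → Nat → Bool) : List Bool :=
  pvSatLoop n edge n ((List.range n).map (fun i => i == 0))

def pvReachesAllB (n : Nat) (edge : Nat → Nat → Bool) : Bool :=
  (pvSaturate n edge).all (fun b => b)

def is_strongly_connected_graph_alt (matrix : List (List Int)) : Bool :=
  if matrix.isEmpty then true
  else
    pvReachesAllB matrix.length (fun u v => pvEdge matrix u v) &&
    pvReachesAllB matrix.length (fun u v => pvEdge matrix v u)

-- ===== PRECONDITION & SPEC =====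
-- Pre_ excludes ragged matrices (a row shorter than the number of rows), on which the
-- Python code raises IndexError on almost every input; on a few such inputs A happens
-- to return False before touching the short row, and B returns False there too.
def Pre_is_strongly_connected_graph (matrix : List (List Int)) : Prop :=
  ∀ row ∈ matrix, matrix.length ≤ row.length
instance (matrix : List (List Int)) : Decidable (Pre_is_strongly_connected_graph matrix) := by
  unfold Pre_is_strongly_connected_graph; infer_instance

def pvWitness_is_strongly_connected_graph : List (List Int) := [[0, 1], [1, 0]]

def Spec_is_strongly_connected_graph (matrix : List (List Int)) (out : Bool) : Prop := out = is_strongly_connected_graph_alt matrix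
instance (matrix : List (List Int)) (out : Bool) : Decidable (Spec_is_strongly_connected_graph matrix out) := by unfold Spec_is_strongly_connected_graph; infer_instance

-- ===== CLAIM (what is proved, stated in full; the proofs are below) =====
def Claim_equal_is_strongly_connected_graph : Prop := ∀ (matrix : List (List Int)), Dom_is_strongly_connected_graph matrix → Pre_is_strongly_connected_graph matrix → Spec_is_strongly_connected_graph matrix (is_strongly_connected_graph matrix)

-- ===== LEMMAS AND PROOFS =====

-- Edge relation and reachability (reflexive–transitive closure) on nodes < n.
def pvR (n : Nat) (E : Nat → Nat → Bool) (a b : Nat) : Prop := a < n ∧ b < n ∧ E a b = true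
def pvReach (n : Nat) (E : Nat → Nat → Bool) : Nat → Nat → Prop := Relation.ReflTransGen (pvR n E)
def pvVis (l : List Bool) (v : Nat) : Prop := l.getD v false = true

lemma pv_fold_filter (p : Nat → Bool) :
    ∀ (l : List Nat) (acc : List Nat),
      l.foldl (fun st nb => if p nb then nb :: st else st) acc = (l.filter p).reverse ++ acc := by
  intro l
  induction l with
  | nil => intro acc; simp
  | cons a t ih =>
      intro acc
      by_cases hp : p a = true <;> simp [List.foldl_cons, hp, ih]

lemma pv_vis_set {l : List Bool} {i : Nat} (h : i < l.length) (v : Nat) :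
    pvVis (l.set i true) v ↔ v = i ∨ pvVis l v := by
  unfold pvVis
  rw [List.getD_eq_getElem?_getD, List.getD_eq_getElem?_getD, List.getElem?_set]
  by_cases hv : i = v
  · subst hv; simp [h]
  · simp [hv, Ne.symm hv]

lemma pv_vis_replicate (n v : Nat) : ¬ pvVis (List.replicate n false) v := by
  unfold pvVis
  rw [List.getD_eq_getElem?_getD, List.getElem?_replicate]
  split <;> simp

lemma pvDfs_spec (n : Nat) (E : Nat → Nat → Bool) (start : Nat) :
    ∀ (visited : List Bool) (stack : List Nat),
      visited.length = n →
      (∀ s ∈ stack, s < n ∧ pvReach n E start s) →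
      (∀ v, pvVis visited v → pvReach n E start v) →
      (∀ u v, pvVis visited u → v < n → E u v = true → pvVis visited v ∨ v ∈ stack) →
      (pvVis visited start ∨ start ∈ stack) →
      (pvDfs n E visited stack).length = n ∧
      (∀ v, pvVis (pvDfs n E visited stack) v → pvReach n E start v) ∧
      (∀ u v, pvVis (pvDfs n E visited stack) u → v < n → E u v = true →
          pvVis (pvDfs n E visited stack) v) ∧
      pvVis (pvDfs n E visited stack) start := by
  intro visited stack
  induction visited, stack using pvDfs.induct n E with
  | case1 visited =>
      intro hlen hstack hsound hclosed hstart
      simp only [pvDfs]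
      refine ⟨hlen, hsound, ?_, ?_⟩
      · intro u v hu hv hE
        rcases hclosed u v hu hv hE with h | h
        · exact h
        · simp at h
      · rcases hstart with h | h
        · exact h
        · simp at h
  | case2 visited node rest h hv ih =>
      intro hlen hstack hsound hclosed hstart
      simp only [pvDfs, h, hv, dif_pos, if_pos]
      refine ih hlen (fun s hs => hstack s (List.mem_cons_of_mem _ hs)) hsound ?_ ?_
      · intro u v hu hvlt hE
        rcases hclosed u v hu hvlt hE with hc | hc
        · exact Or.inl hc
        · rcases List.mem_cons.mp hc with rfl | hc
          · exact Or.inl hv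
          · exact Or.inr hc
      · rcases hstart with hc | hc
        · exact Or.inl hc
        · rcases List.mem_cons.mp hc with rfl | hc
          · exact Or.inl hv
          · exact Or.inr hc
  | case3 visited node rest h hv visited' ih =>
      intro hlen hstack hsound hclosed hstart
      have hnode : node < n ∧ pvReach n E start node := hstack node List.mem_cons_self
      have hset := fun v => pv_vis_set (l := visited) (i := node) h v
      have hfold := pv_fold_filter
        (fun nb => E node nb && !((visited.set node true).getD nb false))
        (List.range n) rest
      have hmem : ∀ x, x ∈ (List.range n).foldl
          (fun st nb => if E node nb && !((visited.set node true).getD nb false)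
            then nb :: st else st) rest ↔
          (x < n ∧ E node x = true ∧ ¬ pvVis (visited.set node true) x) ∨ x ∈ rest := by
        intro x
        rw [hfold]
        simp only [List.mem_append, List.mem_reverse, List.mem_filter, List.mem_range,
          Bool.and_eq_true, Bool.not_eq_true']
        unfold pvVis
        constructor
        · rintro (⟨hx, hE, hng⟩ | hx)
          · refine Or.inl ⟨hx, hE, ?_⟩
            rw [hng]
            simp
          · exact Or.inr hx
        · rintro (⟨hx, hE, hng⟩ | hx)
          · refine Or.inl ⟨hx, hE, ?_⟩
            cases hgd : (visited.set node true).getD x false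
            · rfl
            · exact absurd hgd hng
          · exact Or.inr hx
      simp only [pvDfs, dif_pos h, if_neg hv]
      refine ih ?_ ?_ ?_ ?_ ?_
      · show (visited.set node true).length = n
        simpa using hlen
      · intro s hs
        rcases (hmem s).mp hs with ⟨hslt, hE, _⟩ | hs
        · exact ⟨hslt, hnode.2.tail ⟨hnode.1, hslt, hE⟩⟩
        · exact hstack s (List.mem_cons_of_mem _ hs)
      · intro v hvv
        rcases (hset v).mp hvv with rfl | hvv
        · exact hnode.2
        · exact hsound v hvv
      · intro u v hu hvlt hE
        rcases (hset u).mp hu with hequ | hu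
        · by_cases hvv : pvVis (visited.set node true) v
          · exact Or.inl hvv
          · exact Or.inr ((hmem v).mpr (Or.inl ⟨hvlt, hequ ▸ hE, hvv⟩))
        · rcases hclosed u v hu hvlt hE with hc | hc
          · exact Or.inl ((hset v).mpr (Or.inr hc))
          · rcases List.mem_cons.mp hc with rfl | hc
            · exact Or.inl ((hset v).mpr (Or.inl rfl))
            · exact Or.inr ((hmem v).mpr (Or.inr hc))
      · rcases hstart with hc | hc
        · exact Or.inl ((hset start).mpr (Or.inr hc))
        · rcases List.mem_cons.mp hc with rfl | hc
          · exact Or.inl ((hset start).mpr (Or.inl rfl))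
          · exact Or.inr ((hmem start).mpr (Or.inr hc))
  | case4 visited node rest h =>
      intro hlen hstack _ _ _
      have := (hstack node List.mem_cons_self).1
      omega

lemma pvDfs_correct (n : Nat) (E : Nat → Nat → Bool) (start : Nat) (hs : start < n) :
    (pvDfs n E (List.replicate n false) [start]).length = n ∧
    (∀ v, pvVis (pvDfs n E (List.replicate n false) [start]) v ↔ pvReach n E start v) := by
  have h := pvDfs_spec n E start (List.replicate n false) [start]
    (by simp)
    (by intro s hsmem; simp at hsmem; subst hsmem; exact ⟨hs, Relation.ReflTransGen.refl⟩)
    (by intro v hv; exact absurd hv (pv_vis_replicate n v))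
    (by intro u v hu _ _; exact absurd hu (pv_vis_replicate n u))
    (by simp)
  obtain ⟨hlen, hsound, hclosed, hstart⟩ := h
  refine ⟨hlen, fun v => ⟨hsound v, fun hr => ?_⟩⟩
  induction hr with
  | refl => exact hstart
  | tail _ hbc ih => exact hclosed _ _ ih hbc.2.1 hbc.2.2

lemma pv_all_iff (r : List Bool) (n : Nat) (hlen : r.length = n) :
    (r.all (fun b => b) = true) ↔ ∀ v < n, pvVis r v := by
  subst hlen
  rw [List.all_eq_true]
  constructor
  · intro h v hv
    unfold pvVis
    rw [List.getD_eq_getElem?_getD, List.getElem?_eq_getElem hv]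
    exact h _ (List.getElem_mem hv)
  · intro h x hx
    obtain ⟨i, hi, rfl⟩ := List.mem_iff_getElem.mp hx
    have := h i hi
    unfold pvVis at this
    rwa [List.getD_eq_getElem?_getD, List.getElem?_eq_getElem hi] at this

lemma pvCanReachAll_iff (matrix : List (List Int)) (start : Nat) (hs : start < matrix.length) :
    pvCanReachAll matrix start = true ↔
      ∀ v < matrix.length, pvReach matrix.length (pvEdge matrix) start v := by
  obtain ⟨hlen, hvis⟩ := pvDfs_correct matrix.length (pvEdge matrix) start hs
  unfold pvCanReachAll
  rw [pv_all_iff _ _ hlen]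
  exact ⟨fun h v hv => (hvis v).1 (h v hv), fun h v hv => (hvis v).2 (h v hv)⟩

-- ===== B-side lemmas: the saturation computes reachability from node 0 =====

lemma pv_getD_map_range (n : Nat) (f : Nat → Bool) (v : Nat) :
    (((List.range n).map f).getD v false) = if h : v < n then f v else false := by
  by_cases h : v < n
  · simp [List.getD_eq_getElem?_getD, List.getElem?_map, List.getElem?_range, h]
  · have hge : ((List.range n).map f).length ≤ v := by simpa using Nat.le_of_not_lt h
    simp [List.getD_eq_getElem?_getD, List.getElem?_eq_none hge, h]

lemma pv_step_length (n : Nat) (E : Nat → Nat → Bool) (r : List Bool) :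
    (pvStep n E r).length = n := by simp [pvStep]

lemma pv_vis_lt {r : List Bool} {n v : Nat} (hlen : r.length = n) (hv : pvVis r v) : v < n := by
  by_contra hge
  unfold pvVis at hv
  rw [List.getD_eq_getElem?_getD, List.getElem?_eq_none (by omega)] at hv
  simp at hv

lemma pv_vis_step (n : Nat) (E : Nat → Nat → Bool) (r : List Bool) (v : Nat) :
    pvVis (pvStep n E r) v ↔
      v < n ∧ (pvVis r v ∨ ∃ u < n, pvVis r u ∧ E u v = true) := by
  unfold pvVis pvStep
  rw [pv_getD_map_range]
  by_cases h : v < n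
  · simp only [dif_pos h, Bool.or_eq_true, List.any_eq_true, List.mem_range, Bool.and_eq_true]
    constructor
    · rintro (hr | ⟨u, hu, hru, hE⟩)
      · exact ⟨h, Or.inl hr⟩
      · exact ⟨h, Or.inr ⟨u, hu, hru, hE⟩⟩
    · rintro ⟨_, hr | ⟨u, hu, hru, hE⟩⟩
      · exact Or.inl hr
      · exact Or.inr ⟨u, hu, hru, hE⟩
  · simp [h]

-- after `count true = length` every entry is true, so a round changes nothing
lemma pv_step_of_full (n : Nat) (E : Nat → Nat → Bool) (r : List Bool)
    (hlen : r.length = n) (hfull : r.count true = r.length) :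
    pvStep n E r = r := by
  have hall : ∀ b ∈ r, true = b := List.count_eq_length.mp hfull
  apply List.ext_getElem
  · rw [pv_step_length, hlen]
  · intro i h1 h2
    have hi : i < n := by rwa [pv_step_length] at h1
    have hri : r[i] = true := (hall _ (List.getElem_mem h2)).symm
    have : pvVis (pvStep n E r) i := by
      rw [pv_vis_step]
      refine ⟨hi, Or.inl ?_⟩
      unfold pvVis
      rw [List.getD_eq_getElem?_getD, List.getElem?_eq_getElem h2, hri]
      rfl
    unfold pvVis at this
    simp [List.getD_eq_getElem?_getD, List.getElem?_eq_getElem h1] at this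
    rw [this, hri]

lemma pv_count_true_lt : ∀ (a b : List Bool), (hlen : a.length = b.length) →
    (∀ i (h : i < a.length), a[i] = true → b[i]'(by omega) = true) →
    a ≠ b → a.count true < b.count true := by
  intro a
  induction a with
  | nil =>
      intro b hlen _ hne
      cases b with
      | nil => exact absurd rfl hne
      | cons y ys => simp at hlen
  | cons x xs ih =>
      intro b hlen hpt hne
      cases b with
      | nil => simp at hlen
      | cons y ys =>
          have h0 : x = true → y = true := by
            intro hx
            have := hpt 0 (by simp) (by simpa using hx)
            simpa using this
          have hlen' : xs.length = ys.length := by simpa using hlen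
          have hpt' : ∀ i (h : i < xs.length), xs[i] = true → ys[i]'(by omega) = true := by
            intro i h hx
            have := hpt (i+1) (by simpa using Nat.succ_lt_succ h) (by simpa using hx)
            simpa using this
          by_cases hxy : xs = ys
          · subst hxy
            have hxyne : x ≠ y := by
              intro hcontra; exact hne (by rw [hcontra])
            have hx : x = false := by
              cases x
              · rfl
              · cases y
                · exact absurd (h0 rfl) (by simp)
                · exact absurd rfl hxyne
            have hy : y = true := by
              cases y
              · cases x
                · exact absurd rfl hxyne
                · exact absurd (h0 rfl) (by simp)
              · rfl
            subst hx; subst hy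
            simp [List.count_cons]
          · have := ih ys hlen' hpt' hxy
            cases x
            · cases y <;> simp [List.count_cons] <;> omega
            · have hy := h0 rfl
              subst hy
              simp [List.count_cons]; omega

lemma pv_loop_length (n : Nat) (E : Nat → Nat → Bool) :
    ∀ (fuel : Nat) (r : List Bool), r.length = n → (pvSatLoop n E fuel r).length = n := by
  intro fuel
  induction fuel with
  | zero => intro r h; simpa [pvSatLoop] using h
  | succ j ih =>
      intro r h
      simp only [pvSatLoop]
      split
      · exact h
      · exact ih _ (pv_step_length n E r)

lemma pv_step_pointwise (n : Nat) (E : Nat → Nat → Bool) (r : List Bool) (hlen : r.length = n) :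
    ∀ i (h : i < r.length), r[i] = true → (pvStep n E r)[i]'(by rw [pv_step_length]; omega) = true := by
  intro i h hri
  have hi : i < n := by omega
  have hvis : pvVis (pvStep n E r) i := by
    rw [pv_vis_step]
    refine ⟨hi, Or.inl ?_⟩
    unfold pvVis
    rw [List.getD_eq_getElem?_getD, List.getElem?_eq_getElem h, hri]
    rfl
  unfold pvVis at hvis
  rwa [List.getD_eq_getElem?_getD,
    List.getElem?_eq_getElem (by rw [pv_step_length]; omega : i < (pvStep n E r).length)] at hvis

-- with enough fuel (n ≤ fuel + #true) the loop ends in a fixpoint of the relaxation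
lemma pv_loop_fix (n : Nat) (E : Nat → Nat → Bool) :
    ∀ (fuel : Nat) (r : List Bool), r.length = n → n ≤ fuel + r.count true →
      pvStep n E (pvSatLoop n E fuel r) = pvSatLoop n E fuel r := by
  intro fuel
  induction fuel with
  | zero =>
      intro r hlen hcnt
      have hle : r.count true ≤ r.length := List.count_le_length
      have hfull : r.count true = r.length := by omega
      simpa [pvSatLoop] using pv_step_of_full n E r hlen hfull
  | succ j ih =>
      intro r hlen hcnt
      simp only [pvSatLoop]
      split
      · assumption
      · rename_i hne
        have hlt := pv_count_true_lt r (pvStep n E r)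
          (by rw [pv_step_length, hlen]) (pv_step_pointwise n E r hlen) (Ne.symm hne)
        exact ih (pvStep n E r) (pv_step_length n E r) (by omega)

lemma pv_loop_sound (n : Nat) (E : Nat → Nat → Bool) :
    ∀ (fuel : Nat) (r : List Bool), (∀ v, pvVis r v → pvReach n E 0 v) →
      ∀ v, pvVis (pvSatLoop n E fuel r) v → pvReach n E 0 v := by
  intro fuel
  induction fuel with
  | zero => intro r hr v hv; exact hr v (by simpa [pvSatLoop] using hv)
  | succ j ih =>
      intro r hr v hv
      simp only [pvSatLoop] at hv
      split at hv
      · exact hr v hv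
      · refine ih (pvStep n E r) ?_ v hv
        intro w hw
        rw [pv_vis_step] at hw
        rcases hw.2 with h | ⟨u, hu, hru, hE⟩
        · exact hr w h
        · exact (hr u hru).tail ⟨hu, hw.1, hE⟩

lemma pv_loop_start (n : Nat) (E : Nat → Nat → Bool) (hn : 0 < n) :
    ∀ (fuel : Nat) (r : List Bool), pvVis r 0 → pvVis (pvSatLoop n E fuel r) 0 := by
  intro fuel
  induction fuel with
  | zero => intro r h; simpa [pvSatLoop] using h
  | succ j ih =>
      intro r h
      simp only [pvSatLoop]
      split
      · exact h
      · exact ih _ ((pv_vis_step n E r 0).mpr ⟨hn, Or.inl h⟩)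

lemma pv_saturate_correct (n : Nat) (E : Nat → Nat → Bool) (hn : 0 < n) :
    (pvSaturate n E).length = n ∧
    (∀ v, pvVis (pvSaturate n E) v ↔ pvReach n E 0 v) := by
  set init : List Bool := (List.range n).map (fun i => i == 0) with hinit
  have hinitlen : init.length = n := by simp [hinit]
  have hvinit : ∀ v, pvVis init v ↔ (v < n ∧ v = 0) := by
    intro v
    unfold pvVis
    rw [hinit, pv_getD_map_range]
    by_cases h : v < n
    · simp [h]
    · simp [h]
  have hSat : pvSaturate n E = pvSatLoop n E n init := rfl
  rw [hSat]
  have hlen : (pvSatLoop n E n init).length = n := pv_loop_length n E n init hinitlen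
  have hfix : pvStep n E (pvSatLoop n E n init) = pvSatLoop n E n init :=
    pv_loop_fix n E n init hinitlen (by omega)
  have hsound : ∀ v, pvVis (pvSatLoop n E n init) v → pvReach n E 0 v := by
    refine pv_loop_sound n E n init ?_
    intro v hv
    have := (hvinit v).mp hv
    rw [this.2]
    exact Relation.ReflTransGen.refl
  have hstart : pvVis (pvSatLoop n E n init) 0 :=
    pv_loop_start n E hn n init ((hvinit 0).mpr ⟨hn, rfl⟩)
  -- completeness from the fixpoint: the marked set is closed under edges
  have hclosed : ∀ u v, pvVis (pvSatLoop n E n init) u → v < n → E u v = true →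
      pvVis (pvSatLoop n E n init) v := by
    intro u v hu hv hE
    have huln : u < n := pv_vis_lt hlen hu
    have : pvVis (pvStep n E (pvSatLoop n E n init)) v := by
      rw [pv_vis_step]
      exact ⟨hv, Or.inr ⟨u, huln, hu, hE⟩⟩
    rwa [hfix] at this
  refine ⟨hlen, fun v => ⟨hsound v, fun hr => ?_⟩⟩
  induction hr with
  | refl => exact hstart
  | tail _ hbc ih => exact hclosed _ _ ih hbc.2.1 hbc.2.2

lemma pvReachesAllB_iff (n : Nat) (E : Nat → Nat → Bool) (hn : 0 < n) :
    pvReachesAllB n E = true ↔ ∀ v < n, pvReach n E 0 v := by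
  obtain ⟨hlen, hvis⟩ := pv_saturate_correct n E hn
  unfold pvReachesAllB
  rw [pv_all_iff _ _ hlen]
  exact ⟨fun h v hv => (hvis v).1 (h v hv), fun h v hv => (hvis v).2 (h v hv)⟩

lemma pvReach_swap (n : Nat) (E : Nat → Nat → Bool) (a b : Nat) :
    pvReach n (fun u v => E v u) a b ↔ pvReach n E b a := by
  unfold pvReach
  have h1 : ∀ x y, pvR n (fun u v => E v u) x y ↔ Function.swap (pvR n E) x y := by
    intro x y; unfold pvR Function.swap; tauto
  constructor
  · intro h
    exact Relation.reflTransGen_swap.mp (Relation.ReflTransGen.mono (fun x y hxy => (h1 x y).mp hxy) h)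
  · intro h
    exact Relation.ReflTransGen.mono (fun x y hxy => (h1 x y).mpr hxy) (Relation.reflTransGen_swap.mpr h)

-- Kosaraju criterion: all-pairs reachability ↔ node 0 reaches all ∧ all reach node 0.
lemma pv_kosaraju (n : Nat) (E : Nat → Nat → Bool) (hn : 0 < n) :
    (∀ s < n, ∀ v < n, pvReach n E s v) ↔
      ((∀ v < n, pvReach n E 0 v) ∧ (∀ s < n, pvReach n E s 0)) := by
  constructor
  · intro h
    exact ⟨fun v hv => h 0 hn v hv, fun s hs => h s hs 0 hn⟩
  · rintro ⟨h0, hback⟩ s hs v hv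
    exact Relation.ReflTransGen.trans (hback s hs) (h0 v hv)

-- ===== VERDICT (by name: the statement is the Claim_ definition above) =====
theorem is_strongly_connected_graph_spec : Claim_equal_is_strongly_connected_graph := by
  intro matrix _ _
  unfold Spec_is_strongly_connected_graph
  unfold is_strongly_connected_graph is_strongly_connected_graph_alt
  by_cases hemp : matrix.isEmpty
  · simp [hemp]
  · have hemp' : matrix.isEmpty = false := by simpa using hemp
    simp only [hemp', Bool.false_eq_true, if_false]
    have hn : 0 < matrix.length := by
      cases matrix with
      | nil => simp at hemp'
      | cons a t => simp
    rw [Bool.eq_iff_iff, List.all_eq_true, Bool.and_eq_true,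
        pvReachesAllB_iff _ _ hn, pvReachesAllB_iff _ _ hn]
    constructor
    · intro h
      have hall : ∀ s < matrix.length, ∀ v < matrix.length,
          pvReach matrix.length (pvEdge matrix) s v := by
        intro s hs v hv
        have := h s (List.mem_range.mpr hs)
        exact ((pvCanReachAll_iff matrix s hs).mp this) v hv
      obtain ⟨h0, hback⟩ := (pv_kosaraju _ _ hn).mp hall
      refine ⟨h0, fun v hv => ?_⟩
      rw [pvReach_swap]
      exact hback v hv
    · rintro ⟨h0, hT⟩ s hsmem
      have hs := List.mem_range.mp hsmem
      rw [pvCanReachAll_iff matrix s hs]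
      have hback : ∀ v < matrix.length, pvReach matrix.length (pvEdge matrix) v 0 := by
        intro v hv
        have := hT v hv
        rwa [pvReach_swap] at this
      exact (pv_kosaraju _ _ hn).mpr ⟨h0, hback⟩ s hs
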